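-- pv_equiv track=rewrite | github.com/MdSamiullah/iOOBNFinal_v1 | iOOBNFinal/SIIC_Plot/PlotSIIC_3.py | complexityOfOneBN
-- ===== SOURCE A (Python) =====
-- def complexityOfOneBN(NON, NOS, NOP):
--     complexity = 0
--     for n in range(NON):
--         nodeComplexity = NOS - 1
--         for p in range(NOP):
--             nodeComplexity *= NOS
--         complexity += nodeComplexity
--
--     return complexity
-- ===== SOURCE B (Python) =====
-- def complexityOfOneBN(NON, NOS, NOP):
--     if NON <= 0:
--         return 0
--     return NON * (NOS - 1) * NOS ** max(NOP, 0)
-- ===== Notes on version B (the rewrite author's own statement) =====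
-- stated objective: faster
-- what changed: Replaced the nested loops (per-node loop and per-parent multiplication loop) with the closed form max(NON,0)*(NOS-1)*NOS**max(NOP,0).
import Mathlib
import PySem

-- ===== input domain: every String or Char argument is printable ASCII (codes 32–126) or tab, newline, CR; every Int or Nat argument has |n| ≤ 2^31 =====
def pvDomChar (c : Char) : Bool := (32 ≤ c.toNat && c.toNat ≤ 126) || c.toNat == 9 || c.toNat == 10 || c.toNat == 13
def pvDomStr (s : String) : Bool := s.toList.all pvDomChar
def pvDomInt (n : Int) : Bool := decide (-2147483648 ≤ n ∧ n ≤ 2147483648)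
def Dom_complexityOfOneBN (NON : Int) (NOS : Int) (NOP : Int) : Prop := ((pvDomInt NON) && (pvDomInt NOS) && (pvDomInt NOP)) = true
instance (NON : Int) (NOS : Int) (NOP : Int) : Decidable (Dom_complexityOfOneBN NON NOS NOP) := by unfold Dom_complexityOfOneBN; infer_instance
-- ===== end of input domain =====

-- B replaces A's nested loops with the closed form max(NON,0)*(NOS-1)*NOS^max(NOP,0) (asymptotically faster).
-- ===== PORT A =====
def complexityOfOneBN (NON : Int) (NOS : Int) (NOP : Int) : Int :=
  (PySem.List.pyRange 0 NON 1).foldl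
    (fun complexity _ =>
      complexity + (PySem.List.pyRange 0 NOP 1).foldl (fun nodeComplexity _ => nodeComplexity * NOS) (NOS - 1))
    0

-- ===== PORT B =====
def complexityOfOneBN_alt (NON : Int) (NOS : Int) (NOP : Int) : Int :=
  if NON ≤ 0 then 0
  else NON * (NOS - 1) * NOS ^ (max NOP 0).toNat

-- ===== PRECONDITION & SPEC =====
def Spec_complexityOfOneBN (NON : Int) (NOS : Int) (NOP : Int) (out : Int) : Prop := out = complexityOfOneBN_alt NON NOS NOP
instance (NON : Int) (NOS : Int) (NOP : Int) (out : Int) : Decidable (Spec_complexityOfOneBN NON NOS NOP out) := by unfold Spec_complexityOfOneBN; infer_instance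

-- ===== CLAIM (what is proved, stated in full; the proofs are below) =====
def Claim_equal_complexityOfOneBN : Prop := ∀ (NON : Int) (NOS : Int) (NOP : Int), Dom_complexityOfOneBN NON NOS NOP → Spec_complexityOfOneBN NON NOS NOP (complexityOfOneBN NON NOS NOP)

-- ===== LEMMAS AND PROOFS =====
theorem pv_foldl_mul (NOS x : Int) (l : List Int) :
    l.foldl (fun nc _ => nc * NOS) x = x * NOS ^ l.length := by
  induction l generalizing x with
  | nil => simp
  | cons a t ih => simp [List.foldl, ih, pow_succ]; ring

theorem pv_foldl_add_const (K x : Int) (l : List Int) :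
    l.foldl (fun c _ => c + K) x = x + l.length * K := by
  induction l generalizing x with
  | nil => simp
  | cons a t ih => simp [List.foldl, ih]; ring

-- ===== VERDICT (by name: the statement is the Claim_ definition above) =====
theorem complexityOfOneBN_spec : Claim_equal_complexityOfOneBN := by
  intro NON NOS NOP _
  show _ = _
  unfold complexityOfOneBN complexityOfOneBN_alt
  rw [pv_foldl_add_const, pv_foldl_mul, PySem.List.length_pyRange_one, PySem.List.length_pyRange_one]
  have h2 : (NOP - 0).toNat = (max NOP 0).toNat := by omega
  rw [h2]
  by_cases h : NON ≤ 0
  · simp [h]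
  · rw [if_neg h]
    have h1 : ((NON - 0).toNat : Int) = NON := by omega
    rw [h1]
    ring
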